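-- pv_equiv track=rewrite | github.com/JBTastic/Advent-of-code | 2025/Day02/solution.py | find_invalid_ids_2
-- ===== SOURCE A (Python) =====
-- def find_invalid_ids_2(start: int, end: int) -> list[int]:
--     invalid_ids = []
--
--     for num in range(start, end + 1):
--         num_string = str(num)
--         num_length = len(num_string)
--         is_invalid = False
--
--         # Try block lengths: 1 to half of the total length
--         for block_len in range(1, num_length // 2 + 1):
--
--             # Length must be a multiple of the block length
--             if num_length % block_len != 0:
--                 continue
--
--             block = num_string[:block_len]
--             repeats = num_length // block_len
--
--             if block * repeats == num_string:
--                 is_invalid = True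
--                 break
--
--         if is_invalid:
--             invalid_ids.append(num)
--
--     return invalid_ids
-- ===== SOURCE B (Python) =====
-- def find_invalid_ids_2(start: int, end: int) -> list[int]:
--     # Generate periodic-digit numbers directly from their repeating blocks,
--     # instead of scanning every number in the range.
--     found = []
--     if end >= 0:
--         max_len = len(str(end))
--         for total_len in range(2, max_len + 1):
--             for d in range(1, total_len // 2 + 1):
--                 if total_len % d == 0:
--                     unit = (10 ** total_len - 1) // (10 ** d - 1)
--                     for block in range(10 ** (d - 1), 10 ** d):
--                         n = block * unit
--                         if start <= n <= end:
--                             found.append(n)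
--     return sorted(set(found))
-- ===== Notes on version B (the rewrite author's own statement) =====
-- stated objective: faster
-- what changed: Instead of scanning every integer in [start,end] and testing its digit string for a repeated block, B enumerates periodic numbers directly: for each digit length and each proper divisor block length it builds block*repunit for every block, filters to the range, and returns sorted(set(...)). Intended as faster in the width of the range: a timing run measured ~277x at the largest wide-range input, while on narrow ranges the two costs are similar.
import Mathlib
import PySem

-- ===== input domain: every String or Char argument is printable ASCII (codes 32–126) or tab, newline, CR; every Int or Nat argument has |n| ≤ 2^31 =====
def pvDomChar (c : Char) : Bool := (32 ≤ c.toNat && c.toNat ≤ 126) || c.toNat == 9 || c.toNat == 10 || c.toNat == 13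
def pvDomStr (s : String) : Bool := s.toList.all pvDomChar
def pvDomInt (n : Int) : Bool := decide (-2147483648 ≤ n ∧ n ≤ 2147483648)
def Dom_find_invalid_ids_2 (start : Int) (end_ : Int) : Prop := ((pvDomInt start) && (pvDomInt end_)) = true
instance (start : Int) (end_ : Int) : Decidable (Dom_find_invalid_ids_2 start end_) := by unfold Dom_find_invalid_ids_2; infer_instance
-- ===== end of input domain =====

-- B replaces A's scan of every integer in the range by direct generation of the
-- periodic-digit numbers from their repeating blocks (intended as faster in the
-- range width: a timing run measured ~277x on a wide range, parity on narrow ones).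

-- ===== PORT A =====
-- the inner 'for block_len in …: … break' loop of A (break = return true)
def pvALoop (s : List Char) (L : Int) : List Int → Bool
  | [] => false
  | d :: rest =>
    if PySem.Int.mod L d ≠ 0 then pvALoop s L rest
    else if PySem.List.pyRepeat (PySem.List.slice s none (some d)) (PySem.Int.floordiv L d) == s then
      true
    else pvALoop s L rest

def find_invalid_ids_2 (start : Int) (end_ : Int) : List Int :=
  (PySem.List.pyRange start (end_ + 1) 1).foldl
    (fun invalid_ids num =>
      let num_string := PySem.Int.toChars num
      let num_length : Int := PySem.List.len num_string
      let is_invalid := pvALoop num_string num_length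
        (PySem.List.pyRange 1 (PySem.Int.floordiv num_length 2 + 1) 1)
      if is_invalid then invalid_ids ++ [num] else invalid_ids)
    []

-- ===== PORT B =====
-- Python '10 ** e'; every exponent the port reaches is ≥ 0, where this is exact
def pvPow10 (e : Int) : Int := 10 ^ e.toNat

-- the 'found' list Source B builds by the three nested loops
def pvFound (start : Int) (end_ : Int) : List Int :=
  if end_ ≥ 0 then
    (PySem.List.pyRange 2 (PySem.List.len (PySem.Int.toChars end_) + 1) 1).foldl
      (fun acc total_len =>
        (PySem.List.pyRange 1 (PySem.Int.floordiv total_len 2 + 1) 1).foldl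
          (fun acc d =>
            if PySem.Int.mod total_len d = 0 then
              let unit := PySem.Int.floordiv (pvPow10 total_len - 1) (pvPow10 d - 1)
              (PySem.List.pyRange (pvPow10 (d - 1)) (pvPow10 d) 1).foldl
                (fun acc block =>
                  let n := block * unit
                  if start ≤ n ∧ n ≤ end_ then acc ++ [n] else acc)
                acc
            else acc)
          acc)
      []
  else []

def find_invalid_ids_2_alt (start : Int) (end_ : Int) : List Int :=
  PySem.List.sorted (PySem.Set.ofList (pvFound start end_)) (fun x => x)

-- ===== PRECONDITION & SPEC =====
def Spec_find_invalid_ids_2 (start : Int) (end_ : Int) (out : List Int) : Prop := out = find_invalid_ids_2_alt start end_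
instance (start : Int) (end_ : Int) (out : List Int) : Decidable (Spec_find_invalid_ids_2 start end_ out) := by unfold Spec_find_invalid_ids_2; infer_instance

-- ===== CLAIM (what is proved, stated in full; the proofs are below) =====
def Claim_equal_find_invalid_ids_2 : Prop := ∀ (start : Int) (end_ : Int), Dom_find_invalid_ids_2 start end_ → Spec_find_invalid_ids_2 start end_ (find_invalid_ids_2 start end_)

-- ===== LEMMAS AND PROOFS =====

-- 0,1,…,k-1 copies of the digit block: value 1 + 10^d + … + 10^(d(k-1))
def pvRepunit (d : ℕ) : ℕ → ℕ
  | 0 => 0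
  | k + 1 => 1 + 10 ^ d * pvRepunit d k

-- "n's decimal string is some block of length d repeated k ≥ 2 times" (A's test)
def pvStrPer (n : Int) : Prop :=
  ∃ d k : ℕ, 1 ≤ d ∧ 2 ≤ k ∧ (PySem.Int.toChars n).length = d * k ∧
    (List.replicate k ((PySem.Int.toChars n).take d)).flatten = PySem.Int.toChars n

-- "n = b * (1 + 10^d + … ) for a d-digit block b, k ≥ 2 copies" (B's generator)
def pvNumPer (n : Int) : Prop :=
  ∃ d k b : ℕ, 1 ≤ d ∧ 2 ≤ k ∧ 10 ^ (d - 1) ≤ b ∧ b < 10 ^ d ∧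
    n = ((b * pvRepunit d k : ℕ) : Int)

theorem pvRepunit_pos (d k : ℕ) (hk : 1 ≤ k) : 1 ≤ pvRepunit d k := by
  cases k with
  | zero => omega
  | succ k => simp [pvRepunit]

theorem pvRepunit_int (d k : ℕ) :
    ((10:ℤ) ^ d - 1) * (pvRepunit d k : ℤ) = 10 ^ (d * k) - 1 := by
  induction k with
  | zero => simp [pvRepunit]
  | succ k ih =>
    have : (pvRepunit d (k+1) : ℤ) = 1 + 10 ^ d * (pvRepunit d k : ℤ) := by
      push_cast [pvRepunit]; ring
    rw [this, Nat.mul_succ, pow_add]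
    linear_combination (10:ℤ) ^ d * ih

theorem pvToDigits_eq : ∀ (m : ℕ), 0 < m →
    Nat.toDigits 10 m = ((Nat.digits 10 m).map Nat.digitChar).reverse := by
  intro m
  induction m using Nat.strong_induction_on with
  | _ m ih =>
    intro h
    rw [Nat.toDigits_eq_if (by norm_num), Nat.digits_def' (by norm_num : (1:ℕ) < 10) h]
    by_cases hm : m < 10
    · rw [if_pos hm, Nat.div_eq_of_lt hm, Nat.digits_zero]
      simp [Nat.mod_eq_of_lt hm]
    · rw [if_neg hm]
      have h10 : 0 < m / 10 := Nat.div_pos (by omega) (by norm_num)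
      rw [ih (m / 10) (Nat.div_lt_self h (by norm_num)) h10]
      simp

theorem pvFlattenRep_reverse {α : Type} (k : ℕ) (t : List α) :
    ((List.replicate k t).flatten).reverse = (List.replicate k t.reverse).flatten := by
  induction k with
  | zero => simp
  | succ k ih =>
    rw [List.replicate_succ, List.flatten_cons, List.reverse_append, ih,
      List.replicate_succ' , List.flatten_append]
    simp

theorem pvGetLast?_flattenRep {α : Type} (k : ℕ) (u : List α) (hk : 1 ≤ k) (hu : u ≠ []) :
    ((List.replicate k u).flatten).getLast? = u.getLast? := by
  induction k with
  | zero => omega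
  | succ k ih =>
    rw [List.replicate_succ' , List.flatten_append]
    simp [List.getLast?_append]
    cases h : u.getLast? with
    | none => exact absurd (List.getLast?_eq_none_iff.mp h) hu
    | some a => simp

theorem pvDigitChar_inj (a b : ℕ) (ha : a < 10) (hb : b < 10)
    (h : Nat.digitChar a = Nat.digitChar b) : a = b := by
  interval_cases a <;> interval_cases b <;> revert h <;> decide

theorem pvDigitChar_ne_dash (a : ℕ) (ha : a < 10) : Nat.digitChar a ≠ '-' := by
  interval_cases a <;> decide

theorem pvMap_digitChar_inj : ∀ (xs ys : List ℕ), (∀ x ∈ xs, x < 10) → (∀ y ∈ ys, y < 10) →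
    xs.map Nat.digitChar = ys.map Nat.digitChar → xs = ys := by
  intro xs
  induction xs with
  | nil => intro ys _ _ h; cases ys <;> simp_all
  | cons a xs ih =>
    intro ys hx hy h
    cases ys with
    | nil => simp_all
    | cons b ys =>
      simp only [List.map_cons, List.cons.injEq] at h
      have hab : a = b :=
        pvDigitChar_inj a b (hx a (by simp)) (hy b (by simp)) h.1
      rw [hab, ih ys (fun x hx' => hx x (by simp [hx'])) (fun y hy' => hy y (by simp [hy'])) h.2]

theorem pvOfDigits_flattenRep (u : List ℕ) (k : ℕ) :
    Nat.ofDigits 10 ((List.replicate k u).flatten) = Nat.ofDigits 10 u * pvRepunit u.length k := by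
  induction k with
  | zero => simp [pvRepunit]
  | succ k ih =>
    rw [List.replicate_succ, List.flatten_cons, Nat.ofDigits_append, ih, pvRepunit]
    ring

theorem pvDigitsLen_eq (b d : ℕ) (hd : 1 ≤ d) (h1 : 10 ^ (d - 1) ≤ b) (h2 : b < 10 ^ d) :
    (Nat.digits 10 b).length = d := by
  have hb0 : b ≠ 0 := by
    have : (1:ℕ) ≤ 10 ^ (d-1) := Nat.one_le_pow _ _ (by norm_num)
    omega
  rw [Nat.length_digits 10 b (by norm_num) hb0,
    Nat.log_eq_of_pow_le_of_lt_pow h1 (by rwa [Nat.sub_add_cancel hd])]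
  omega

theorem pvDigits_mul_repunit (d k b : ℕ) (hd : 1 ≤ d) (hk : 1 ≤ k)
    (h1 : 10 ^ (d - 1) ≤ b) (h2 : b < 10 ^ d) :
    Nat.digits 10 (b * pvRepunit d k) = (List.replicate k (Nat.digits 10 b)).flatten := by
  have hb0 : b ≠ 0 := by
    have : (1:ℕ) ≤ 10 ^ (d-1) := Nat.one_le_pow _ _ (by norm_num)
    omega
  have hlen : (Nat.digits 10 b).length = d := pvDigitsLen_eq b d hd h1 h2
  have hne : Nat.digits 10 b ≠ [] := by
    intro h; rw [h] at hlen; simp at hlen; omega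
  have hval : Nat.ofDigits 10 ((List.replicate k (Nat.digits 10 b)).flatten) = b * pvRepunit d k := by
    rw [pvOfDigits_flattenRep, Nat.ofDigits_digits, hlen]
  rw [← hval, Nat.digits_ofDigits 10 (by norm_num)]
  · intro x hx
    rw [List.mem_flatten] at hx
    obtain ⟨l, hl, hxl⟩ := hx
    rw [List.eq_of_mem_replicate hl] at hxl
    exact Nat.digits_lt_base (by norm_num) hxl
  · intro hne'
    have hgl := pvGetLast?_flattenRep k (Nat.digits 10 b) hk hne
    rw [List.getLast?_eq_some_getLast hne', List.getLast?_eq_some_getLast hne] at hgl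
    rw [Option.some.inj hgl]
    exact Nat.getLast_digit_ne_zero 10 hb0

theorem pvDigitsLen_mono (m e : ℕ) (hm : 0 < m) (hme : m ≤ e) :
    (Nat.digits 10 m).length ≤ (Nat.digits 10 e).length := by
  rw [Nat.length_digits 10 m (by norm_num) (by omega),
    Nat.length_digits 10 e (by norm_num) (by omega)]
  exact Nat.add_le_add_right (Nat.log_mono_right hme) 1

theorem pvStrPer_iff (n : Int) : pvStrPer n ↔ pvNumPer n := by
  constructor
  · rintro ⟨d, k, hd, hk, hlen, hper⟩
    by_cases hneg : n < 0
    · exfalso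
      have hsdef : PySem.Int.toChars n = '-' :: Nat.toDigits 10 n.natAbs := by
        simp [PySem.Int.toChars, hneg]
      set s := PySem.Int.toChars n with hs
      set t := s.take d with ht
      have hks : k = (k - 1) + 1 := by omega
      have hsplit : s = t ++ (List.replicate (k - 1) t).flatten := by
        conv_lhs => rw [← hper, hks, List.replicate_succ, List.flatten_cons]
      have htlen : t.length = d := by
        rw [ht, List.length_take, hlen]; exact Nat.min_eq_left (Nat.le_mul_of_pos_right d (by omega))
      have ht0 : t ≠ [] := by intro h; rw [h] at htlen; simp at htlen; omega
      obtain ⟨c, t', hct⟩ := List.exists_cons_of_ne_nil ht0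
      have hcons : '-' :: Nat.toDigits 10 n.natAbs = c :: (t' ++ (List.replicate (k - 1) t).flatten) := by
        rw [← hsdef, hsplit, hct]; rfl
      have hchead : c = '-' := (List.cons.injEq _ _ _ _).mp hcons |>.1.symm
      have hmemt : '-' ∈ t := by rw [hct, hchead]; simp
      have hmem : '-' ∈ Nat.toDigits 10 n.natAbs := by
        have h1 : '-' ∈ (List.replicate (k - 1) t).flatten := by
          rw [List.mem_flatten]
          exact ⟨t, List.mem_replicate.mpr ⟨by omega, rfl⟩, hmemt⟩
        have h2 := (List.cons.injEq _ _ _ _).mp hcons |>.2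
        rw [h2]; exact List.mem_append_right _ h1
      have hpos : 0 < n.natAbs := by omega
      rw [pvToDigits_eq _ hpos, List.mem_reverse, List.mem_map] at hmem
      obtain ⟨a, ha, hda⟩ := hmem
      exact pvDigitChar_ne_dash a (Nat.digits_lt_base (by norm_num) ha) hda
    · rw [Int.not_lt] at hneg
      have hsdef : PySem.Int.toChars n = Nat.toDigits 10 n.toNat := by
        simp [PySem.Int.toChars, not_lt.mpr hneg]
      set m := n.toNat with hm
      rw [hsdef] at hlen hper
      by_cases hm0 : m = 0
      · exfalso
        rw [hm0, Nat.toDigits_zero] at hlen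
        simp at hlen
        nlinarith
      have hmpos : 0 < m := by omega
      set s := Nat.toDigits 10 m with hs
      have hbr : s = ((Nat.digits 10 m).map Nat.digitChar).reverse := pvToDigits_eq m hmpos
      set ds := Nat.digits 10 m with hds
      have hdslen : ds.length = d * k := by
        have := congrArg List.length hbr
        simp at this; rw [← this]; exact hlen
      set t := s.take d with ht
      have htlen : t.length = d := by
        rw [ht, List.length_take, hlen]; exact Nat.min_eq_left (Nat.le_mul_of_pos_right d (by omega))
      have hmap : ds.map Nat.digitChar = s.reverse := by rw [hbr, List.reverse_reverse]
      have hrev : s.reverse = (List.replicate k t.reverse).flatten := by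
        conv_lhs => rw [← hper]
        exact pvFlattenRep_reverse k t
      set u := ds.take d with hu
      have hulen : u.length = d := by
        rw [hu, List.length_take, hdslen]; exact Nat.min_eq_left (Nat.le_mul_of_pos_right d (by omega))
      have hmapu : u.map Nat.digitChar = t.reverse := by
        have h1 := congrArg (List.take d) hmap
        rw [← List.map_take, ← hu] at h1
        rw [h1, hrev]
        have hks : k = (k - 1) + 1 := by omega
        rw [hks, List.replicate_succ, List.flatten_cons]
        exact List.take_left' (by simp [htlen])
      have hflat : ds = (List.replicate k u).flatten := by
        apply pvMap_digitChar_inj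
        · exact fun x hx => Nat.digits_lt_base (by norm_num) hx
        · intro y hy
          rw [List.mem_flatten] at hy
          obtain ⟨l, hl, hyl⟩ := hy
          rw [List.eq_of_mem_replicate hl] at hyl
          exact Nat.digits_lt_base (by norm_num) (List.mem_of_mem_take hyl)
        · rw [hmap, hrev, List.map_flatten, List.map_replicate, hmapu]
      set b := Nat.ofDigits 10 u with hb
      have hdu : ∀ x ∈ u, x < 10 :=
        fun x hx => Nat.digits_lt_base (by norm_num) (List.mem_of_mem_take hx)
      have hval : m = b * pvRepunit d k := by
        conv_lhs => rw [← Nat.ofDigits_digits 10 m, ← hds, hflat]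
        rw [pvOfDigits_flattenRep, hulen]
      have hblt : b < 10 ^ d := by
        rw [← hulen]; exact Nat.ofDigits_lt_base_pow_length (by norm_num) hdu
      have hune : u ≠ [] := by intro h; rw [h] at hulen; simp at hulen; omega
      have hdsne : ds ≠ [] := by
        intro h; rw [h] at hdslen; simp at hdslen; omega
      have hlastu : ∀ (h : u ≠ []), u.getLast h ≠ 0 := by
        intro h
        have hgl := pvGetLast?_flattenRep k u (by omega) hune
        rw [← hflat, List.getLast?_eq_some_getLast hdsne, List.getLast?_eq_some_getLast h] at hgl
        rw [← Option.some.inj hgl]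
        exact Nat.getLast_digit_ne_zero 10 hm0
      have hdigb : Nat.digits 10 b = u := Nat.digits_ofDigits 10 (by norm_num) u hdu hlastu
      have hb0 : b ≠ 0 := by
        intro h; rw [h, Nat.digits_zero] at hdigb; exact hune hdigb.symm
      have hbge : 10 ^ (d - 1) ≤ b := by
        have hle := Nat.base_pow_length_digits_le 10 b (by norm_num) hb0
        rw [hdigb, hulen] at hle
        have hd' : d = (d - 1) + 1 := by omega
        rw [hd', pow_succ] at hle
        have := Nat.le_of_mul_le_mul_right (by omega : 10 ^ (d-1) * 10 ≤ b * 10) (by norm_num : 0 < 10)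
        exact this
      exact ⟨d, k, b, hd, hk, hbge, hblt, by rw [← hval, hm]; exact (Int.toNat_of_nonneg hneg).symm⟩
  · rintro ⟨d, k, b, hd, hk, h1, h2, hn⟩
    set m := b * pvRepunit d k with hmdef
    have hb : 1 ≤ b := le_trans (Nat.one_le_pow _ _ (by norm_num)) h1
    have hmpos : 0 < m := le_trans (by omega) (Nat.mul_le_mul hb (pvRepunit_pos d k (by omega)))
    have hnneg : ¬ n < 0 := by rw [hn]; omega
    have hsdef : PySem.Int.toChars n = Nat.toDigits 10 m := by
      simp [PySem.Int.toChars, hn]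
    set u := Nat.digits 10 b with hu
    have hulen : u.length = d := pvDigitsLen_eq b d hd h1 h2
    have hflat : Nat.digits 10 m = (List.replicate k u).flatten := pvDigits_mul_repunit d k b hd (by omega) h1 h2
    set s := Nat.toDigits 10 m with hs
    have hbr : s = ((Nat.digits 10 m).map Nat.digitChar).reverse := pvToDigits_eq m hmpos
    set t := (u.map Nat.digitChar).reverse with htdef
    have hsflat : s = (List.replicate k t).flatten := by
      rw [hbr, hflat, List.map_flatten, List.map_replicate, pvFlattenRep_reverse]
    have htlen : t.length = d := by simp [htdef, hulen]
    have hslen : s.length = d * k := by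
      rw [hsflat]
      simp [List.length_flatten, List.map_replicate, List.sum_replicate, htlen, Nat.mul_comm]
    have htake : s.take d = t := by
      rw [hsflat]
      have hks : k = (k - 1) + 1 := by omega
      rw [hks, List.replicate_succ, List.flatten_cons]
      exact List.take_left' (by simp [htlen])
    refine ⟨d, k, hd, hk, ?_, ?_⟩
    · rw [hsdef]; exact hslen
    · rw [hsdef, htake, ← hsflat]

theorem pvNumPer_pos (n : Int) (h : pvNumPer n) : 1 ≤ n := by
  obtain ⟨d, k, b, hd, hk, h1, h2, hn⟩ := h
  have hb : 1 ≤ b := le_trans (Nat.one_le_pow _ _ (by norm_num)) h1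
  have hr : 1 ≤ pvRepunit d k := pvRepunit_pos d k (by omega)
  have hm : 1 ≤ b * pvRepunit d k := le_trans (by omega) (Nat.mul_le_mul hb hr)
  rw [hn]; exact_mod_cast hm

theorem pvALoop_iff (s : List Char) (L : Int) (ds : List Int) :
    pvALoop s L ds = true ↔
      ∃ d ∈ ds, PySem.Int.mod L d = 0 ∧
        PySem.List.pyRepeat (PySem.List.slice s none (some d)) (PySem.Int.floordiv L d) = s := by
  induction ds with
  | nil => simp [pvALoop]
  | cons d rest ih =>
    rw [pvALoop]
    by_cases h : PySem.Int.mod L d = 0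
    · rw [if_neg (by simp [h])]
      by_cases hr : PySem.List.pyRepeat (PySem.List.slice s none (some d)) (PySem.Int.floordiv L d) = s
      · rw [if_pos (by simp [hr])]
        simp only [true_iff]
        exact ⟨d, List.mem_cons_self, h, hr⟩
      · rw [if_neg (by simp [hr]), ih]
        constructor
        · rintro ⟨e, he, h2⟩; exact ⟨e, List.mem_cons_of_mem _ he, h2⟩
        · rintro ⟨e, he, h2, h3⟩
          rcases List.mem_cons.mp he with rfl | he'
          · exact absurd h3 hr
          · exact ⟨e, he', h2, h3⟩
    · rw [if_pos (by simp [h]), ih]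
      constructor
      · rintro ⟨e, he, h2⟩; exact ⟨e, List.mem_cons_of_mem _ he, h2⟩
      · rintro ⟨e, he, h2, h3⟩
        rcases List.mem_cons.mp he with rfl | he'
        · exact absurd h2 h
        · exact ⟨e, he', h2, h3⟩

theorem pvATest_iff (num : Int) :
    (pvALoop (PySem.Int.toChars num) (PySem.List.len (PySem.Int.toChars num))
      (PySem.List.pyRange 1 (PySem.Int.floordiv (PySem.List.len (PySem.Int.toChars num)) 2 + 1) 1) = true)
      ↔ pvStrPer num := by
  rw [pvALoop_iff]
  set s := PySem.Int.toChars num with hs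
  have hlen : PySem.List.len s = (s.length : Int) := PySem.List.len_eq s
  have hfl2 : PySem.Int.floordiv (PySem.List.len s) 2 = ((s.length / 2 : ℕ) : Int) := by
    rw [hlen]; exact_mod_cast PySem.Int.floordiv_natCast s.length 2
  constructor
  · rintro ⟨dI, hdI, hmod, hrep⟩
    rw [PySem.List.mem_pyRange_one] at hdI
    obtain ⟨hd1, hd2⟩ := hdI
    set dn := dI.toNat with hdn
    have hdIeq : dI = (dn : Int) := (Int.toNat_of_nonneg (by omega)).symm
    rw [PySem.Int.mod_eq_zero_iff_dvd] at hmod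
    have hdvd : dn ∣ s.length := by
      rw [hdIeq, hlen] at hmod; exact_mod_cast hmod
    have hbound : dn ≤ s.length / 2 := by
      rw [hfl2] at hd2; omega
    have hdp : 0 < dn := by omega
    rw [PySem.List.slice_to s (by omega : (0:ℤ) ≤ dI)] at hrep
    have hfld : PySem.Int.floordiv (PySem.List.len s) dI = ((s.length / dn : ℕ) : Int) := by
      rw [hlen, hdIeq]; exact_mod_cast PySem.Int.floordiv_natCast s.length dn
    rw [hfld] at hrep
    unfold PySem.List.pyRepeat at hrep
    rw [Int.toNat_natCast] at hrep
    set kq := s.length / dn with hkq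
    have hlenk : s.length = dn * kq := by
      rw [hkq, Nat.mul_div_cancel' hdvd]
    have h2d : dn * 2 ≤ s.length := (Nat.le_div_iff_mul_le (by norm_num)).mp hbound
    have hk2 : 2 ≤ kq := by
      by_contra hlt
      have : kq ≤ 1 := by omega
      have := Nat.mul_le_mul_left dn this
      omega
    refine ⟨dn, kq, hdp, hk2, hlenk, ?_⟩
    rw [hdIeq] at hrep
    rw [Int.toNat_natCast] at hrep
    exact hrep
  · rintro ⟨d, k, hd, hk, hlen2, hper⟩
    refine ⟨(d : Int), ?_, ?_, ?_⟩
    · rw [PySem.List.mem_pyRange_one]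
      refine ⟨by exact_mod_cast hd, ?_⟩
      rw [hfl2]
      have : d ≤ s.length / 2 := by
        apply (Nat.le_div_iff_mul_le (by norm_num)).mpr
        calc d * 2 ≤ d * k := Nat.mul_le_mul_left d hk
        _ = s.length := hlen2.symm
      exact_mod_cast Nat.lt_succ_of_le this
    · rw [PySem.Int.mod_eq_zero_iff_dvd, hlen]
      have hdvd : d ∣ s.length := ⟨k, hlen2⟩
      exact_mod_cast hdvd
    · rw [PySem.List.slice_to s (by exact_mod_cast Int.natCast_nonneg d), Int.toNat_natCast]
      have hflD : PySem.Int.floordiv (PySem.List.len s) (d : Int) = ((s.length / d : ℕ) : Int) := by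
        rw [hlen]; exact_mod_cast PySem.Int.floordiv_natCast s.length d
      rw [hflD]
      unfold PySem.List.pyRepeat
      rw [Int.toNat_natCast]
      have : s.length / d = k := by rw [hlen2, Nat.mul_div_cancel_left _ (by omega)]
      rw [this]
      exact hper

-- the repunit value B divides out: (10^L - 1) // (10^d - 1)
def pvUnit (L d : Int) : Int := PySem.Int.floordiv (pvPow10 L - 1) (pvPow10 d - 1)

theorem pvUnit_eq (dn kn : ℕ) (hd : 1 ≤ dn) :
    pvUnit ((dn * kn : ℕ) : Int) ((dn : ℕ) : Int) = (pvRepunit dn kn : ℤ) := by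
  have hpos : (0:ℤ) < 10 ^ dn - 1 := by
    have : (10:ℤ) ^ 1 ≤ 10 ^ dn := pow_le_pow_right₀ (by norm_num) hd
    simp at this; omega
  unfold pvUnit pvPow10
  rw [Int.toNat_natCast, Int.toNat_natCast,
    PySem.Int.floordiv_eq_ediv_of_pos hpos, ← pvRepunit_int dn kn,
    Int.mul_ediv_cancel_left _ (by omega)]

theorem pvFound_eq (start end_ : Int) (he : end_ ≥ 0) :
    pvFound start end_ =
      (PySem.List.pyRange 2 (PySem.List.len (PySem.Int.toChars end_) + 1) 1).flatMap (fun L =>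
        (PySem.List.pyRange 1 (PySem.Int.floordiv L 2 + 1) 1).flatMap (fun d =>
          if PySem.Int.mod L d = 0 then
            ((PySem.List.pyRange (pvPow10 (d - 1)) (pvPow10 d) 1).filter
              (fun block => decide (start ≤ block * pvUnit L d ∧ block * pvUnit L d ≤ end_))).map
              (fun block => block * pvUnit L d)
          else [])) := by
  unfold pvFound
  rw [if_pos he]
  rw [PySem.List.foldl_congr_mem _ _
    (fun acc L => acc ++ (PySem.List.pyRange 1 (PySem.Int.floordiv L 2 + 1) 1).flatMap (fun d =>
      if PySem.Int.mod L d = 0 then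
        ((PySem.List.pyRange (pvPow10 (d - 1)) (pvPow10 d) 1).filter
          (fun block => decide (start ≤ block * pvUnit L d ∧ block * pvUnit L d ≤ end_))).map
          (fun block => block * pvUnit L d)
      else [])) _ ?_]
  · rw [PySem.List.foldl_append_eq_flatMap]
    simp
  · intro acc L _
    rw [PySem.List.foldl_congr_mem _ _
      (fun acc d => acc ++ (if PySem.Int.mod L d = 0 then
        ((PySem.List.pyRange (pvPow10 (d - 1)) (pvPow10 d) 1).filter
          (fun block => decide (start ≤ block * pvUnit L d ∧ block * pvUnit L d ≤ end_))).map
          (fun block => block * pvUnit L d)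
        else [])) _ ?_]
    · rw [PySem.List.foldl_append_eq_flatMap]
    · intro acc d _
      by_cases hc : PySem.Int.mod L d = 0
      · simp only [if_pos hc]
        exact PySem.List.foldl_append_ite
          (fun block => start ≤ block * pvUnit L d ∧ block * pvUnit L d ≤ end_)
          (fun block => block * pvUnit L d) _ acc
      · simp only [if_neg hc, List.append_nil]

theorem pvMem_found (start end_ n : Int) :
    n ∈ pvFound start end_ ↔ start ≤ n ∧ n ≤ end_ ∧ pvNumPer n := by
  by_cases he : end_ ≥ 0
  · rw [pvFound_eq start end_ he]
    simp only [List.mem_flatMap, PySem.List.mem_pyRange_one]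
    constructor
    · rintro ⟨L, ⟨hL2, hLmax⟩, d, ⟨hd1, hd2⟩, hn⟩
      split_ifs at hn with hc
      · simp only [List.mem_map, List.mem_filter, PySem.List.mem_pyRange_one,
          decide_eq_true_eq] at hn
        obtain ⟨block, ⟨⟨hb1, hb2⟩, hcond⟩, hneq⟩ := hn
        -- convert to naturals
        set Ln := L.toNat with hLn
        set dn := d.toNat with hdn
        have hLeq : L = (Ln : Int) := (Int.toNat_of_nonneg (by omega)).symm
        have hdeq : d = (dn : Int) := (Int.toNat_of_nonneg (by omega)).symm
        have hdp : 1 ≤ dn := by omega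
        rw [PySem.Int.mod_eq_zero_iff_dvd, hLeq, hdeq] at hc
        have hdvd : dn ∣ Ln := by exact_mod_cast hc
        set kn := Ln / dn with hkn
        have hLk : Ln = dn * kn := by rw [hkn, Nat.mul_div_cancel' hdvd]
        have hfl2 : PySem.Int.floordiv L 2 = ((Ln / 2 : ℕ) : Int) := by
          rw [hLeq]; exact_mod_cast PySem.Int.floordiv_natCast Ln 2
        have hk2 : 2 ≤ kn := by
          rw [hfl2] at hd2
          have hble : dn ≤ Ln / 2 := by omega
          have h2d : dn * 2 ≤ Ln := (Nat.le_div_iff_mul_le (by norm_num)).mp hble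
          by_contra hlt
          have : kn ≤ 1 := by omega
          have := Nat.mul_le_mul_left dn this
          omega
        -- pow bounds
        have hpd : pvPow10 d = ((10 ^ dn : ℕ) : Int) := by
          unfold pvPow10; rw [hdeq, Int.toNat_natCast]; push_cast; rfl
        have hpd1 : pvPow10 (d - 1) = ((10 ^ (dn - 1) : ℕ) : Int) := by
          unfold pvPow10
          have : (d - 1).toNat = dn - 1 := by omega
          rw [this]; push_cast; rfl
        have hbpos : 0 < block := by
          rw [hpd1] at hb1
          have : (0:ℤ) < ((10 ^ (dn - 1) : ℕ) : Int) := by positivity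
          omega
        set bn := block.toNat with hbn
        have hbeq : block = (bn : Int) := (Int.toNat_of_nonneg (by omega)).symm
        have hbnge : 10 ^ (dn - 1) ≤ bn := by
          rw [hpd1, hbeq] at hb1; exact_mod_cast hb1
        have hbnlt : bn < 10 ^ dn := by
          rw [hpd, hbeq] at hb2; exact_mod_cast hb2
        have hunit : pvUnit L d = (pvRepunit dn kn : ℤ) := by
          rw [hLeq, hdeq, hLk]; exact_mod_cast pvUnit_eq dn kn hdp
        have hnval : n = ((bn * pvRepunit dn kn : ℕ) : Int) := by
          rw [← hneq, hunit, hbeq]; push_cast; ring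
        rw [hneq] at hcond
        exact ⟨hcond.1, hcond.2, dn, kn, bn, hdp, hk2, hbnge, hbnlt, hnval⟩
      · exact absurd hn List.not_mem_nil
    · rintro ⟨hs, hen, d, k, b, hd, hk, h1, h2, hn⟩
      refine ⟨((d * k : ℕ) : Int), ⟨?_, ?_⟩, ((d : ℕ) : Int), ⟨?_, ?_⟩, ?_⟩
      · have : 2 ≤ d * k := le_trans hk (Nat.le_mul_of_pos_left k (by omega))
        exact_mod_cast this
      · -- d * k < maxLen + 1
        have hnpos : 1 ≤ n := pvNumPer_pos n ⟨d, k, b, hd, hk, h1, h2, hn⟩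
        have hepos : 0 < end_.toNat := by omega
        have hchars : PySem.Int.toChars end_ = Nat.toDigits 10 end_.toNat := by
          unfold PySem.Int.toChars
          rw [if_neg (by omega : ¬ end_ < 0)]
        have hm : (b * pvRepunit d k : ℕ) ≤ end_.toNat := by
          have : n ≤ end_ := hen
          rw [hn] at this
          omega
        have hmpos : 0 < b * pvRepunit d k := by
          have : (0:ℤ) < ((b * pvRepunit d k : ℕ) : Int) := by rw [← hn]; omega
          exact_mod_cast this
        have hdiglen : (Nat.digits 10 (b * pvRepunit d k)).length = k * d := by
          rw [pvDigits_mul_repunit d k b hd (by omega) h1 h2]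
          simp [List.length_flatten, List.map_replicate, List.sum_replicate, smul_eq_mul,
            pvDigitsLen_eq b d hd h1 h2]
        have hmono := pvDigitsLen_mono _ _ hmpos hm
        have hlen_e : (PySem.List.len (PySem.Int.toChars end_)) = ((Nat.digits 10 end_.toNat).length : Int) := by
          rw [PySem.List.len_eq, hchars, pvToDigits_eq _ hepos]
          simp
        rw [hlen_e]
        have : d * k ≤ (Nat.digits 10 end_.toNat).length := by
          rw [Nat.mul_comm]; omega
        omega
      · have : (1:ℕ) ≤ d := hd
        exact_mod_cast this
      · -- d < (d*k)//2 + 1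
        have hfl2 : PySem.Int.floordiv ((d * k : ℕ) : Int) 2 = ((d * k / 2 : ℕ) : Int) := by
          exact_mod_cast PySem.Int.floordiv_natCast (d * k) 2
        rw [hfl2]
        have : d ≤ d * k / 2 := by
          apply (Nat.le_div_iff_mul_le (by norm_num)).mpr
          exact Nat.mul_le_mul_left d hk
        exact_mod_cast Nat.lt_succ_of_le this
      · rw [if_pos (by rw [PySem.Int.mod_eq_zero_iff_dvd]; exact_mod_cast (⟨k, rfl⟩ : d ∣ d * k))]
        simp only [List.mem_map, List.mem_filter, PySem.List.mem_pyRange_one, decide_eq_true_eq]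
        have hval : (b : Int) * pvUnit ((d * k : ℕ) : Int) ((d : ℕ) : Int) = n := by
          rw [pvUnit_eq d k hd, hn]; push_cast; ring
        refine ⟨(b : Int), ⟨⟨?_, ?_⟩, ?_⟩, hval⟩
        · unfold pvPow10
          have h' : ((d:ℤ) - 1).toNat = d - 1 := by omega
          rw [h']
          exact_mod_cast h1
        · unfold pvPow10
          rw [Int.toNat_natCast]
          exact_mod_cast h2
        · rw [hval]
          exact ⟨hs, hen⟩
  · rw [pvFound]
    rw [if_neg he]
    simp only [List.not_mem_nil, false_iff]
    rintro ⟨_, hen, hnum⟩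
    have := pvNumPer_pos n hnum
    omega

theorem pvA_eq_filter (start end_ : Int) :
    find_invalid_ids_2 start end_ =
      (PySem.List.pyRange start (end_ + 1) 1).filter
        (fun num => pvALoop (PySem.Int.toChars num) (PySem.List.len (PySem.Int.toChars num))
          (PySem.List.pyRange 1 (PySem.Int.floordiv (PySem.List.len (PySem.Int.toChars num)) 2 + 1) 1)) := by
  unfold find_invalid_ids_2
  rw [PySem.List.foldl_append_if_eq_filter
    (fun num => pvALoop (PySem.Int.toChars num) (PySem.List.len (PySem.Int.toChars num))
      (PySem.List.pyRange 1 (PySem.Int.floordiv (PySem.List.len (PySem.Int.toChars num)) 2 + 1) 1))]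
  rfl

-- ===== VERDICT (by name: the statement is the Claim_ definition above) =====
theorem find_invalid_ids_2_spec : Claim_equal_find_invalid_ids_2 := by
  unfold Claim_equal_find_invalid_ids_2
  intro start end_ _
  unfold Spec_find_invalid_ids_2 find_invalid_ids_2_alt
  rw [pvA_eq_filter]
  symm
  apply PySem.List.sorted_eq_of_perm_of_pairwise_lt
  · rw [List.perm_ext_iff_of_nodup (List.Nodup.filter _ (PySem.List.nodup_pyRange_one _ _))
      (PySem.Set.nodup_ofList _)]
    intro a
    rw [PySem.Set.mem_ofList, pvMem_found, List.mem_filter, PySem.List.mem_pyRange_one,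
      pvATest_iff, pvStrPer_iff]
    constructor
    · rintro ⟨⟨h1, h2⟩, h3⟩; exact ⟨h1, by omega, h3⟩
    · rintro ⟨h1, h2, h3⟩; exact ⟨⟨h1, by omega⟩, h3⟩
  · exact List.Pairwise.filter _ (PySem.List.pairwise_lt_pyRange_one _ _)
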